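-- pv_equiv track=rewrite | github.com/spolu/s4t | dataset/generator.py | cnf_from_clauses
-- ===== SOURCE A (Python) =====
-- import typing
--
-- def cnf_from_clauses(
--         clauses: typing.List[typing.List[int]],
--         generator_name: str,
-- ) -> str:
--     variable_count = 0
--
--     for cl in clauses:
--         for v in cl:
--             t = max(v, -v)
--             assert t > 0
--             if t > variable_count:
--                 variable_count = t
--
--     cnf = "c generator: {}".format(generator_name)
--     cnf += "\np cnf {} {}".format(variable_count, len(clauses))
--     for cl in clauses:
--         cnf += "\n"
--         for v in cl:
--             cnf += "{} ".format(v)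
--         cnf += "0"
--
--     return cnf, variable_count, len(clauses)
-- ===== SOURCE B (Python) =====
-- def cnf_from_clauses(clauses, generator_name):
--     # Single merged pass: update the running variable maximum AND build each
--     # clause's formatted piece in the same loop (A scans the clauses twice).
--     variable_count = 0
--     pieces = []
--     for cl in clauses:
--         parts = []
--         for v in cl:
--             t = abs(v)
--             assert t > 0
--             if t > variable_count:
--                 variable_count = t
--             parts.append("%d " % v)
--         pieces.append("".join(parts) + "0")
--     header = "c generator: %s\np cnf %d %d" % (
--         generator_name, variable_count, len(clauses))
--     return "\n".join([header] + pieces), variable_count, len(clauses)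
-- ===== Notes on version B (the rewrite author's own statement) =====
-- stated objective: alternative
-- what changed: B merges A's two separate nested passes into one pass that simultaneously maintains the running variable maximum and collects each clause's formatted piece, then assembles header + pieces with a single join instead of repeated string +=.
import Mathlib
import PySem

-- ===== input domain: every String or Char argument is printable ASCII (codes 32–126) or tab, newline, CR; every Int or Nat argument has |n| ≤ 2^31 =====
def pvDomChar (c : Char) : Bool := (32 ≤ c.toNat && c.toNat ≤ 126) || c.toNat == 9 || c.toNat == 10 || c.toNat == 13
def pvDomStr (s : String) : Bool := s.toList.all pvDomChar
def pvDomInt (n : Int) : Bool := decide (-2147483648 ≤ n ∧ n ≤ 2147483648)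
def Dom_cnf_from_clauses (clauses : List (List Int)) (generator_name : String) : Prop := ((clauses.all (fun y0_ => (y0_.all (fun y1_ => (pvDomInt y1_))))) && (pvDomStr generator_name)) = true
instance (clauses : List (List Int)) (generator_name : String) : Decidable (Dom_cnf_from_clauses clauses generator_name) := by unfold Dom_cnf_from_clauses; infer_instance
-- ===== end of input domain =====

-- B merges A's two separate nested passes into one pass carrying a pair state
-- (running variable maximum, collected clause pieces), then joins header + pieces once.

-- ===== PORT A =====
def cnf_from_clauses (clauses : List (List Int)) (generator_name : String) : String × Int × Int :=
  let vc : Int := clauses.foldl (fun vc cl => cl.foldl (fun vc v =>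
      let t := max v (-v); if t > vc then t else vc) vc) 0
  let cnf : List Char := "c generator: ".toList ++ generator_name.toList
  let cnf := cnf ++ "\np cnf ".toList ++ PySem.Int.toChars vc ++ [' '] ++ PySem.Int.toChars (clauses.length : Int)
  let cnf := clauses.foldl (fun cnf cl =>
      (cl.foldl (fun cnf v => cnf ++ PySem.Int.toChars v ++ [' ']) (cnf ++ ['\n'])) ++ ['0']) cnf
  (String.ofList cnf, vc, (clauses.length : Int))

-- ===== PORT B =====
-- inner loop of B: one clause, returns (updated running max, clause's chars)
def pvClauseStep : List Int → Int → Int × List Char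
  | [], vc => (vc, [])
  | v :: rest, vc =>
      let t := |v|
      let vc' := if t > vc then t else vc
      let r := pvClauseStep rest vc'
      (r.1, PySem.Int.toChars v ++ [' '] ++ r.2)

-- outer loop of B: all clauses, returns (variable_count, pieces)
def pvLoop : List (List Int) → Int → Int × List (List Char)
  | [], vc => (vc, [])
  | cl :: rest, vc =>
      let c := pvClauseStep cl vc
      let r := pvLoop rest c.1
      (r.1, (c.2 ++ ['0']) :: r.2)

def cnf_from_clauses_alt (clauses : List (List Int)) (generator_name : String) : String × Int × Int :=
  let p := pvLoop clauses 0
  let header : List Char := "c generator: ".toList ++ generator_name.toList ++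
    "\np cnf ".toList ++ PySem.Int.toChars p.1 ++ [' '] ++ PySem.Int.toChars (clauses.length : Int)
  (String.ofList (List.intercalate ['\n'] (header :: p.2)), p.1, (clauses.length : Int))

-- ===== PRECONDITION & SPEC =====
-- Pre_ excludes inputs where some clause contains the literal 0: there A's 'assert t > 0' raises AssertionError (B's assert raises too).
def Pre_cnf_from_clauses (clauses : List (List Int)) (generator_name : String) : Prop :=
  (clauses.all (fun cl => cl.all (fun v => v != 0))) = true
instance (clauses : List (List Int)) (generator_name : String) : Decidable (Pre_cnf_from_clauses clauses generator_name) := by unfold Pre_cnf_from_clauses; infer_instance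
def pvWitness_cnf_from_clauses : List (List Int) × String := ([[1, -2], [3]], "rand")

def Spec_cnf_from_clauses (clauses : List (List Int)) (generator_name : String) (out : String × Int × Int) : Prop := out = cnf_from_clauses_alt clauses generator_name
instance (clauses : List (List Int)) (generator_name : String) (out : String × Int × Int) : Decidable (Spec_cnf_from_clauses clauses generator_name out) := by unfold Spec_cnf_from_clauses; infer_instance

-- ===== CLAIM =====
def Claim_equal_cnf_from_clauses : Prop := ∀ (clauses : List (List Int)) (generator_name : String), Dom_cnf_from_clauses clauses generator_name → Pre_cnf_from_clauses clauses generator_name → Spec_cnf_from_clauses clauses generator_name (cnf_from_clauses clauses generator_name)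

-- ===== LEMMAS AND PROOFS =====

-- B's per-clause pair step: first component = A's running-max fold, second is vc-independent.
theorem pv_clause_eq (cl : List Int) (vc : Int) :
    pvClauseStep cl vc =
      (cl.foldl (fun vc v => let t := max v (-v); if t > vc then t else vc) vc,
       cl.flatMap (fun v => PySem.Int.toChars v ++ [' '])) := by
  induction cl generalizing vc with
  | nil => rfl
  | cons v rest ih =>
    simp only [pvClauseStep, List.foldl_cons, List.flatMap_cons, ih, abs_eq_max_neg]

-- B's outer pair loop: first component = A's variable_count fold, second = the clause pieces.
theorem pv_loop_eq (clauses : List (List Int)) (vc : Int) :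
    pvLoop clauses vc =
      (clauses.foldl (fun vc cl => cl.foldl (fun vc v =>
          let t := max v (-v); if t > vc then t else vc) vc) vc,
       clauses.map (fun cl => cl.flatMap (fun v => PySem.Int.toChars v ++ [' ']) ++ ['0'])) := by
  induction clauses generalizing vc with
  | nil => rfl
  | cons cl rest ih =>
    simp only [pvLoop, pv_clause_eq, List.foldl_cons, List.map_cons, ih]

-- '\n'.join of a nonempty list of lines, unrolled.
theorem pv_intercalate_cons (x : List Char) (xs : List (List Char)) :
    List.intercalate ['\n'] (x :: xs) = x ++ xs.flatMap (fun y => '\n' :: y) := by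
  induction xs generalizing x with
  | nil => simp [List.intercalate]
  | cons y ys ih =>
    have h : List.intercalate ['\n'] (x :: y :: ys)
        = x ++ '\n' :: List.intercalate ['\n'] (y :: ys) := by
      simp [List.intercalate, List.intersperse]
    rw [h, ih y]
    simp

-- A's string-building loops flatten to the join of the clause pieces.
theorem pv_body_eq (clauses : List (List Int)) (acc : List Char) :
    clauses.foldl (fun cnf cl =>
      (cl.foldl (fun cnf v => cnf ++ PySem.Int.toChars v ++ [' ']) (cnf ++ ['\n'])) ++ ['0']) acc
    = acc ++ clauses.flatMap (fun cl =>
        '\n' :: (cl.flatMap (fun v => PySem.Int.toChars v ++ [' ']) ++ ['0'])) := by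
  induction clauses generalizing acc with
  | nil => simp
  | cons cl rest ih =>
    simp only [List.foldl_cons, List.flatMap_cons, ih]
    have hin : ∀ (a : List Char),
        cl.foldl (fun cnf v => cnf ++ PySem.Int.toChars v ++ [' ']) a
        = a ++ cl.flatMap (fun v => PySem.Int.toChars v ++ [' ']) := by
      intro a
      induction cl generalizing a with
      | nil => simp
      | cons v t iht => simp [List.flatMap_def]
    simp [List.flatMap_def]

-- ===== VERDICT =====
theorem cnf_from_clauses_spec : Claim_equal_cnf_from_clauses := by
  intro clauses generator_name _ _
  unfold Spec_cnf_from_clauses cnf_from_clauses cnf_from_clauses_alt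
  simp only [pv_loop_eq, pv_body_eq, pv_intercalate_cons]
  simp [List.flatMap_map]
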